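-- pv_equiv track=rewrite | github.com/Staeg/wager | src/hex.py | reachable_hexes
-- ===== SOURCE A (Python) =====
-- from collections import deque
--
-- def hex_neighbors(col, row, cols, rows):
--     parity = row % 2
--     if parity == 0:
--         dirs = [(1, 0), (-1, 0), (0, -1), (0, 1), (-1, -1), (-1, 1)]
--     else:
--         dirs = [(1, 0), (-1, 0), (0, -1), (0, 1), (1, -1), (1, 1)]
--     results = []
--     for dc, dr in dirs:
--         nc, nr = col + dc, row + dr
--         if 0 <= nc < cols and 0 <= nr < rows:
--             results.append((nc, nr))
--     return results
--
-- def reachable_hexes(start, steps, cols, rows, occupied):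
--     """Return set of hexes reachable from start within `steps` moves, avoiding occupied."""
--     visited = {start: 0}
--     queue = deque([(start, 0)])
--     while queue:
--         pos, dist = queue.popleft()
--         if dist >= steps:
--             continue
--         for nb in hex_neighbors(pos[0], pos[1], cols, rows):
--             if nb not in visited and nb not in occupied:
--                 visited[nb] = dist + 1
--                 queue.append((nb, dist + 1))
--     result = set(visited.keys())
--     result.discard(start)
--     return result
-- ===== SOURCE B (Python) =====
-- def hex_neighbors(col, row, cols, rows):
--     parity = row % 2
--     if parity == 0:
--         dirs = [(1, 0), (-1, 0), (0, -1), (0, 1), (-1, -1), (-1, 1)]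
--     else:
--         dirs = [(1, 0), (-1, 0), (0, -1), (0, 1), (1, -1), (1, 1)]
--     results = []
--     for dc, dr in dirs:
--         nc, nr = col + dc, row + dr
--         if 0 <= nc < cols and 0 <= nr < rows:
--             results.append((nc, nr))
--     return results
--
-- def reachable_hexes(start, steps, cols, rows, occupied):
--     """Level-synchronous flood fill: expand one whole frontier per step."""
--     visited = {start}
--     frontier = [start]
--     for _ in range(steps):
--         if not frontier:
--             break
--         next_frontier = []
--         for c, r in frontier:
--             for nb in hex_neighbors(c, r, cols, rows):
--                 if nb not in visited and nb not in occupied: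
--                     visited.add(nb)
--                     next_frontier.append(nb)
--         frontier = next_frontier
--     visited.discard(start)
--     return visited
-- ===== Notes on version B (the rewrite author's own statement) =====
-- stated objective: simpler
-- what changed: Replaces the deque-of-(pos,dist) BFS that threads a distance through every queue entry with a level-synchronous flood fill that expands one whole frontier list per step and needs no distances or deque at all.
import Mathlib
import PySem

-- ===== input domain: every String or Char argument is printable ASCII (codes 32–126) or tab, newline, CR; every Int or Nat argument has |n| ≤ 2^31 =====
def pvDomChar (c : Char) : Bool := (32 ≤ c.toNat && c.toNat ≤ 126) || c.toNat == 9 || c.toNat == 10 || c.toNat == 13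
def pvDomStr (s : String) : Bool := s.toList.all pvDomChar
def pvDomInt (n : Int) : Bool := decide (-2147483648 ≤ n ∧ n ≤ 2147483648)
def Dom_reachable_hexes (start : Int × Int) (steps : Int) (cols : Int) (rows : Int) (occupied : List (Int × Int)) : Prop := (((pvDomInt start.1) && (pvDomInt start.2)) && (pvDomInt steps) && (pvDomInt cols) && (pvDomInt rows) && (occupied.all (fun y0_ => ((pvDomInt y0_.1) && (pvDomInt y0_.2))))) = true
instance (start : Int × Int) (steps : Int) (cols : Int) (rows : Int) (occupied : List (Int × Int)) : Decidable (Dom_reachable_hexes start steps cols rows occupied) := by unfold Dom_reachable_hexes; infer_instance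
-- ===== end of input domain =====

-- B replaces A's deque-of-(pos,dist) BFS by a level-synchronous flood fill (one frontier list per
-- step, no distances kept); objective: simpler. Equality proved on the returned value for all inputs.

-- ===== PORT A =====

-- shared module helper hex_neighbors (used by both A and B, as in the Python module)
def hexNeighbors (col row cols rows : Int) : List (Int × Int) :=
  let parity := PySem.Int.mod row 2
  let dirs : List (Int × Int) :=
    if parity = 0 then [(1, 0), (-1, 0), (0, -1), (0, 1), (-1, -1), (-1, 1)]
    else [(1, 0), (-1, 0), (0, -1), (0, 1), (1, -1), (1, 1)]
  dirs.foldl (fun results d =>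
    if 0 ≤ col + d.1 ∧ col + d.1 < cols ∧ 0 ≤ row + d.2 ∧ row + d.2 < rows
    then results ++ [(col + d.1, row + d.2)] else results) []

-- every neighbour is in-bounds (needed by bfsLoop's termination measure)
theorem hexNeighbors_mem_grid (col row cols rows : Int) :
    ∀ p ∈ hexNeighbors col row cols rows,
      p ∈ (Finset.Icc 0 (cols - 1)) ×ˢ (Finset.Icc 0 (rows - 1)) := by
  intro p hp
  unfold hexNeighbors at hp
  rw [PySem.List.foldl_append_ite] at hp
  simp only [List.nil_append, List.mem_map, List.mem_filter] at hp
  obtain ⟨d, hd, rfl⟩ := hp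
  simp only [decide_eq_true_eq] at hd
  simp only [Finset.mem_product, Finset.mem_Icc]
  omega

-- A's inner neighbour loop body ('if nb not in visited and nb not in occupied: …')
def expandA (occupied : List (Int × Int)) (dist : Int)
    (acc : PySem.Dict (Int × Int) Int × List ((Int × Int) × Int)) (nb : Int × Int) :
    PySem.Dict (Int × Int) Int × List ((Int × Int) × Int) :=
  if acc.1.contains nb = false ∧ nb ∉ occupied
  then (acc.1.insert nb (dist + 1), acc.2 ++ [(nb, dist + 1)])
  else acc

-- the A-side fold never shrinks the termination measure's budget: inserted keys are fresh and in-grid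
theorem expandA_fold_measure (occupied : List (Int × Int)) (cols rows dist : Int)
    (nbs : List (Int × Int))
    (hg : ∀ p ∈ nbs, p ∈ (Finset.Icc 0 (cols - 1)) ×ˢ (Finset.Icc 0 (rows - 1))) :
    ∀ (d : PySem.Dict (Int × Int) Int) (q : List ((Int × Int) × Int)),
      ((((Finset.Icc 0 (cols - 1)) ×ˢ (Finset.Icc 0 (rows - 1))) \ (nbs.foldl (expandA occupied dist) (d, q)).1.keys.toFinset).card
        + (nbs.foldl (expandA occupied dist) (d, q)).2.length)
      ≤ (((Finset.Icc 0 (cols - 1)) ×ˢ (Finset.Icc 0 (rows - 1))) \ d.keys.toFinset).card + q.length := by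
  induction nbs with
  | nil => intro d q; simp
  | cons nb t ih =>
    intro d q
    simp only [List.foldl_cons]
    by_cases h : d.contains nb = false ∧ nb ∉ occupied
    · rw [show expandA occupied dist (d, q) nb = (d.insert nb (dist + 1), q ++ [(nb, dist + 1)])
        from by simp only [expandA, if_pos h]]
      refine le_trans (ih (fun p hp => hg p (List.mem_cons_of_mem _ hp)) _ _) ?_
      simp only [List.length_append, List.length_cons, List.length_nil]
      have hkeys : (d.insert nb (dist + 1)).keys = d.keys ++ [nb] :=
        PySem.Dict.keys_insert_of_not_contains _ _ h.1
      have hnbG : nb ∈ (Finset.Icc 0 (cols - 1)) ×ˢ (Finset.Icc 0 (rows - 1)) :=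
        hg nb (List.mem_cons_self)
      have hnbK : nb ∉ d.keys.toFinset := by
        simp only [List.mem_toFinset]
        intro hmem
        have := (PySem.Dict.contains_iff_mem_keys (d := d) (k := nb)).mpr hmem
        rw [h.1] at this; exact Bool.false_ne_true this
      have hsub : ((Finset.Icc 0 (cols - 1)) ×ˢ (Finset.Icc 0 (rows - 1))) \ (d.insert nb (dist + 1)).keys.toFinset
          = (((Finset.Icc 0 (cols - 1)) ×ˢ (Finset.Icc 0 (rows - 1))) \ d.keys.toFinset).erase nb := by
        rw [hkeys]
        ext x
        simp only [Finset.mem_sdiff, List.mem_toFinset, List.mem_append, List.mem_singleton,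
          Finset.mem_erase]
        tauto
      rw [hsub]
      have hmem : nb ∈ ((Finset.Icc 0 (cols - 1)) ×ˢ (Finset.Icc 0 (rows - 1))) \ d.keys.toFinset :=
        Finset.mem_sdiff.mpr ⟨hnbG, hnbK⟩
      have hce := Finset.card_erase_of_mem hmem
      have hpos : 0 < (((Finset.Icc 0 (cols - 1)) ×ˢ (Finset.Icc 0 (rows - 1))) \ d.keys.toFinset).card :=
        Finset.card_pos.mpr ⟨nb, hmem⟩
      omega
    · rw [show expandA occupied dist (d, q) nb = (d, q) from by simp only [expandA, if_neg h]]
      exact ih (fun p hp => hg p (List.mem_cons_of_mem _ hp)) _ _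

-- A's BFS loop: 'while queue: pos, dist = queue.popleft(); …'
def bfsLoop (steps cols rows : Int) (occupied : List (Int × Int)) :
    List ((Int × Int) × Int) → PySem.Dict (Int × Int) Int → PySem.Dict (Int × Int) Int
  | [], visited => visited
  | (pos, dist) :: rest, visited =>
    if steps ≤ dist then bfsLoop steps cols rows occupied rest visited
    else
      let st := (hexNeighbors pos.1 pos.2 cols rows).foldl (expandA occupied dist) (visited, [])
      bfsLoop steps cols rows occupied (rest ++ st.2) st.1
  termination_by q v => (((Finset.Icc 0 (cols - 1)) ×ˢ (Finset.Icc 0 (rows - 1))) \ v.keys.toFinset).card + q.length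
  decreasing_by
  · simp only [List.length_cons]; omega
  · have := expandA_fold_measure occupied cols rows dist (hexNeighbors pos.1 pos.2 cols rows)
      (hexNeighbors_mem_grid pos.1 pos.2 cols rows) visited []
    simp only [List.length_append, List.length_cons, List.length_nil] at *
    omega

def reachable_hexes (start : Int × Int) (steps : Int) (cols : Int) (rows : Int) (occupied : List (Int × Int)) : List (Int × Int) :=
  let visited := bfsLoop steps cols rows occupied [(start, 0)] (PySem.Dict.mk [(start, 0)])
  PySem.Set.discard (PySem.Set.ofList visited.keys) start

-- ===== PORT B =====

-- B's inner neighbour loop body ('if nb not in visited and nb not in occupied: …')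
def expandB (occupied : List (Int × Int))
    (acc : PySem.Set (Int × Int) × List (Int × Int)) (nb : Int × Int) :
    PySem.Set (Int × Int) × List (Int × Int) :=
  if nb ∉ acc.1 ∧ nb ∉ occupied then (PySem.Set.add acc.1 nb, acc.2 ++ [nb]) else acc

-- B's per-cell body: 'for nb in hex_neighbors(c, r, cols, rows): …'
def cellB (cols rows : Int) (occupied : List (Int × Int))
    (acc : PySem.Set (Int × Int) × List (Int × Int)) (cell : Int × Int) :
    PySem.Set (Int × Int) × List (Int × Int) :=
  (hexNeighbors cell.1 cell.2 cols rows).foldl (expandB occupied) acc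

-- B's outer loop: 'for _ in range(steps): if not frontier: break; …'
def floodLoop (cols rows : Int) (occupied : List (Int × Int)) :
    Nat → PySem.Set (Int × Int) → List (Int × Int) → PySem.Set (Int × Int)
  | 0, visited, _ => visited
  | n + 1, visited, frontier =>
    if frontier = [] then visited
    else
      let st := frontier.foldl (cellB cols rows occupied) (visited, [])
      floodLoop cols rows occupied n st.1 st.2

def reachable_hexes_alt (start : Int × Int) (steps : Int) (cols : Int) (rows : Int) (occupied : List (Int × Int)) : List (Int × Int) :=
  let visited := floodLoop cols rows occupied steps.toNat (PySem.Set.ofList [start]) [start]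
  PySem.Set.discard visited start

-- ===== PRECONDITION & SPEC =====
def Spec_reachable_hexes (start : Int × Int) (steps : Int) (cols : Int) (rows : Int) (occupied : List (Int × Int)) (out : List (Int × Int)) : Prop := out = reachable_hexes_alt start steps cols rows occupied
instance (start : Int × Int) (steps : Int) (cols : Int) (rows : Int) (occupied : List (Int × Int)) (out : List (Int × Int)) : Decidable (Spec_reachable_hexes start steps cols rows occupied out) := by unfold Spec_reachable_hexes; infer_instance

-- ===== CLAIM (what is proved, stated in full; the proofs are below) =====
def Claim_equal_reachable_hexes : Prop := ∀ (start : Int × Int) (steps : Int) (cols : Int) (rows : Int) (occupied : List (Int × Int)), Dom_reachable_hexes start steps cols rows occupied → Spec_reachable_hexes start steps cols rows occupied (reachable_hexes start steps cols rows occupied)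

-- ===== LEMMAS AND PROOFS =====

-- A's inner fold only appends to the queue component
theorem foldA_append (occupied : List (Int × Int)) (dist : Int) (nbs : List (Int × Int)) :
    ∀ (d : PySem.Dict (Int × Int) Int) (q : List ((Int × Int) × Int)),
      nbs.foldl (expandA occupied dist) (d, q)
        = ((nbs.foldl (expandA occupied dist) (d, [])).1,
           q ++ (nbs.foldl (expandA occupied dist) (d, [])).2) := by
  induction nbs with
  | nil => intro d q; simp
  | cons nb t ih =>
    intro d q
    simp only [List.foldl_cons]
    by_cases h : d.contains nb = false ∧ nb ∉ occupied
    · rw [show expandA occupied dist (d, q) nb = (d.insert nb (dist + 1), q ++ [(nb, dist + 1)])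
          from by simp [expandA, h],
        show expandA occupied dist (d, []) nb = (d.insert nb (dist + 1), [(nb, dist + 1)])
          from by simp [expandA, h]]
      rw [ih (d.insert nb (dist + 1)) (q ++ [(nb, dist + 1)]),
        ih (d.insert nb (dist + 1)) [(nb, dist + 1)]]
      simp
    · rw [show expandA occupied dist (d, q) nb = (d, q) from by simp [expandA, h],
        show expandA occupied dist (d, []) nb = (d, []) from by simp [expandA, h]]
      exact ih d q

-- B's inner fold only appends to the next-frontier component
theorem foldB_append (occupied : List (Int × Int)) (nbs : List (Int × Int)) :
    ∀ (s : PySem.Set (Int × Int)) (q : List (Int × Int)),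
      nbs.foldl (expandB occupied) (s, q)
        = ((nbs.foldl (expandB occupied) (s, [])).1,
           q ++ (nbs.foldl (expandB occupied) (s, [])).2) := by
  induction nbs with
  | nil => intro s q; simp
  | cons nb t ih =>
    intro s q
    simp only [List.foldl_cons]
    by_cases h : nb ∉ s ∧ nb ∉ occupied
    · rw [show expandB occupied (s, q) nb = (PySem.Set.add s nb, q ++ [nb])
          from by simp [expandB, h],
        show expandB occupied (s, []) nb = (PySem.Set.add s nb, [nb]) from by simp [expandB, h]]
      rw [ih (PySem.Set.add s nb) (q ++ [nb]), ih (PySem.Set.add s nb) [nb]]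
      simp
    · rw [show expandB occupied (s, q) nb = (s, q) from by simp [expandB, h],
        show expandB occupied (s, []) nb = (s, []) from by simp [expandB, h]]
      exact ih s q

-- correspondence of the two inner neighbour folds: dict keys track the set, queue tracks the frontier
theorem expand_corr (occupied : List (Int × Int)) (dist : Int) (nbs : List (Int × Int)) :
    ∀ (d : PySem.Dict (Int × Int) Int) (s : PySem.Set (Int × Int)), d.keys = s →
      (nbs.foldl (expandA occupied dist) (d, [])).1.keys
          = (nbs.foldl (expandB occupied) (s, [])).1
        ∧ (nbs.foldl (expandA occupied dist) (d, [])).2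
          = (nbs.foldl (expandB occupied) (s, [])).2.map (fun p => (p, dist + 1)) := by
  induction nbs with
  | nil => intro d s h; simpa using h
  | cons nb t ih =>
    intro d s h
    simp only [List.foldl_cons]
    have hiff : d.contains nb = false ↔ nb ∉ s := by
      rw [← h]
      constructor
      · intro hc hmem
        have := (PySem.Dict.contains_iff_mem_keys d nb).mpr hmem
        rw [hc] at this; exact Bool.false_ne_true this
      · intro hmem
        by_contra hne
        exact hmem ((PySem.Dict.contains_iff_mem_keys d nb).mp (by
          cases hcv : d.contains nb with
          | false => exact absurd hcv hne
          | true => rfl))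
    by_cases hb : nb ∉ s ∧ nb ∉ occupied
    · have ha : d.contains nb = false ∧ nb ∉ occupied := ⟨hiff.mpr hb.1, hb.2⟩
      rw [show expandA occupied dist (d, []) nb = (d.insert nb (dist + 1), [(nb, dist + 1)])
          from by simp [expandA, ha],
        show expandB occupied (s, []) nb = (PySem.Set.add s nb, [nb]) from by simp [expandB, hb]]
      have hkeys : (d.insert nb (dist + 1)).keys = PySem.Set.add s nb := by
        rw [PySem.Dict.keys_insert_of_not_contains _ _ ha.1, PySem.Set.add_of_not_mem hb.1, h]
      obtain ⟨h1, h2⟩ := ih (d.insert nb (dist + 1)) (PySem.Set.add s nb) hkeys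
      rw [foldA_append occupied dist t _ [(nb, dist + 1)], foldB_append occupied t _ [nb]]
      exact ⟨h1, by rw [h2]; simp⟩
    · have ha : ¬ (d.contains nb = false ∧ nb ∉ occupied) := by
        intro hc; exact hb ⟨hiff.mp hc.1, hc.2⟩
      rw [show expandA occupied dist (d, []) nb = (d, []) from by simp only [expandA, if_neg ha],
        show expandB occupied (s, []) nb = (s, []) from by simp only [expandB, if_neg hb]]
      exact ih d s h

-- once every queue entry is at distance ≥ steps, A's loop drains the queue without changes
theorem bfsLoop_drain (steps cols rows : Int) (occupied : List (Int × Int)) :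
    ∀ (q : List ((Int × Int) × Int)) (d : PySem.Dict (Int × Int) Int),
      (∀ e ∈ q, steps ≤ e.2) → bfsLoop steps cols rows occupied q d = d := by
  intro q
  induction q with
  | nil => intro d _; rw [bfsLoop]
  | cons e rest ih =>
    intro d hq
    obtain ⟨pos, dist⟩ := e
    rw [bfsLoop, if_pos (hq (pos, dist) List.mem_cons_self)]
    exact ih d (fun e he => hq e (List.mem_cons_of_mem _ he))

-- processing the remainder of one BFS level = B's fold over that part of the frontier
theorem corrLevel (steps cols rows : Int) (occupied : List (Int × Int)) (dist : Int)
    (hd : ¬ steps ≤ dist) :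
    ∀ (F : List (Int × Int)) (d : PySem.Dict (Int × Int) Int) (accN : List (Int × Int)),
      ∃ d' : PySem.Dict (Int × Int) Int,
        d'.keys = (F.foldl (cellB cols rows occupied) (d.keys, accN)).1
        ∧ bfsLoop steps cols rows occupied
            (F.map (fun p => (p, dist)) ++ accN.map (fun p => (p, dist + 1))) d
          = bfsLoop steps cols rows occupied
              ((F.foldl (cellB cols rows occupied) (d.keys, accN)).2.map (fun p => (p, dist + 1))) d' := by
  intro F
  induction F with
  | nil => intro d accN; exact ⟨d, rfl, rfl⟩
  | cons p F' ih =>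
    intro d accN
    simp only [List.map_cons, List.cons_append, List.foldl_cons]
    rw [bfsLoop, if_neg hd]
    have hcorr := expand_corr occupied dist (hexNeighbors p.1 p.2 cols rows) d d.keys rfl
    set stA := (hexNeighbors p.1 p.2 cols rows).foldl (expandA occupied dist) (d, []) with hstA
    set stB := (hexNeighbors p.1 p.2 cols rows).foldl (expandB occupied) (d.keys, []) with hstB
    have hcell : cellB cols rows occupied (d.keys, accN) p = (stB.1, accN ++ stB.2) := by
      rw [cellB, foldB_append]
    have hq : F'.map (fun p => (p, dist)) ++ (accN.map (fun p => (p, dist + 1)) ++ stA.2)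
        = F'.map (fun p => (p, dist)) ++ (accN ++ stB.2).map (fun p => (p, dist + 1)) := by
      rw [hcorr.2]; simp
    simp only [List.append_assoc]
    rw [hq]
    obtain ⟨d', hk, he⟩ := ih stA.1 (accN ++ stB.2)
    refine ⟨d', ?_, ?_⟩
    · rw [hk, hcell, hcorr.1]
    · rw [he, hcell, hcorr.1]

-- B's inner fold keeps the visited set duplicate-free
theorem expandB_fold_nodup (occupied : List (Int × Int)) (nbs : List (Int × Int)) :
    ∀ (s : PySem.Set (Int × Int)) (q : List (Int × Int)), s.Nodup →
      (nbs.foldl (expandB occupied) (s, q)).1.Nodup := by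
  induction nbs with
  | nil => intro s q hs; exact hs
  | cons nb t ih =>
    intro s q hs
    simp only [List.foldl_cons]
    by_cases h : nb ∉ s ∧ nb ∉ occupied
    · rw [show expandB occupied (s, q) nb = (PySem.Set.add s nb, q ++ [nb]) from by simp [expandB, h]]
      exact ih _ _ (PySem.Set.nodup_add _ _ hs)
    · rw [show expandB occupied (s, q) nb = (s, q) from by simp [expandB, h]]
      exact ih _ _ hs

theorem cellB_fold_nodup (cols rows : Int) (occupied : List (Int × Int)) (F : List (Int × Int)) :
    ∀ (s : PySem.Set (Int × Int)) (q : List (Int × Int)), s.Nodup →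
      (F.foldl (cellB cols rows occupied) (s, q)).1.Nodup := by
  induction F with
  | nil => intro s q hs; exact hs
  | cons p F' ih =>
    intro s q hs
    simp only [List.foldl_cons]
    rw [cellB, foldB_append]
    exact ih _ _ (expandB_fold_nodup occupied _ s [] hs)

theorem floodLoop_nodup (cols rows : Int) (occupied : List (Int × Int)) :
    ∀ (k : Nat) (s : PySem.Set (Int × Int)) (F : List (Int × Int)), s.Nodup →
      (floodLoop cols rows occupied k s F).Nodup := by
  intro k
  induction k with
  | zero => intro s F hs; exact hs
  | succ n ih =>
    intro s F hs
    rw [floodLoop]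
    split_ifs with h
    · exact hs
    · exact ih _ _ (cellB_fold_nodup cols rows occupied F s [] hs)

-- set(xs) of a duplicate-free list is the list itself
theorem ofList_eq_self_of_nodup {xs : List (Int × Int)} (h : xs.Nodup) :
    PySem.Set.ofList xs = xs := by
  have gen : ∀ (ys s : List (Int × Int)), (s ++ ys).Nodup → ys.foldl PySem.Set.add s = s ++ ys := by
    intro ys
    induction ys with
    | nil => intro s _; simp
    | cons y t ih =>
      intro s hsy
      have hy : y ∉ s := fun hmem =>
        List.disjoint_of_nodup_append hsy hmem List.mem_cons_self
      simp only [List.foldl_cons]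
      rw [PySem.Set.add_of_not_mem hy, ih (s ++ [y]) (by simpa using hsy)]
      simp
  simpa [PySem.Set.ofList_eq_foldl] using gen xs [] (by simpa using h)

-- the BFS from one level's frontier equals the flood fill with the matching fuel
theorem corrMain (steps cols rows : Int) (occupied : List (Int × Int)) :
    ∀ (k : Nat) (dist : Int), (steps - dist).toNat = k →
      ∀ (F : List (Int × Int)) (d : PySem.Dict (Int × Int) Int),
        (bfsLoop steps cols rows occupied (F.map (fun p => (p, dist))) d).keys
          = floodLoop cols rows occupied k d.keys F := by
  intro k
  induction k with
  | zero =>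
    intro dist hk F d
    have hle : steps ≤ dist := by omega
    rw [bfsLoop_drain steps cols rows occupied _ d (by
      intro e he
      obtain ⟨p, _, rfl⟩ := List.mem_map.mp he
      exact hle)]
    rfl
  | succ n ih =>
    intro dist hk F d
    have hd : ¬ steps ≤ dist := by omega
    by_cases hF : F = []
    · subst hF
      rw [show (([] : List (Int × Int)).map (fun p => (p, dist))) = [] from rfl, bfsLoop]
      rw [floodLoop, if_pos rfl]
    · obtain ⟨d', hk', he⟩ := corrLevel steps cols rows occupied dist hd F d []
      rw [show F.map (fun p => (p, dist)) = F.map (fun p => (p, dist)) ++ ([] : List (Int × Int)).map (fun p => (p, dist + 1)) from by simp]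
      rw [he, ih (dist + 1) (by omega) _ d', hk']
      rw [floodLoop, if_neg hF]

-- ===== VERDICT (by name: the statement is the Claim_ definition above) =====
theorem reachable_hexes_spec : Claim_equal_reachable_hexes := by
  intro start steps cols rows occupied _
  unfold Spec_reachable_hexes reachable_hexes reachable_hexes_alt
  show (PySem.Set.ofList
      (bfsLoop steps cols rows occupied [(start, 0)] (PySem.Dict.mk [(start, 0)])).keys).discard start
    = (floodLoop cols rows occupied steps.toNat (PySem.Set.ofList [start]) [start]).discard start
  have h0 : (PySem.Dict.mk [(start, 0)] : PySem.Dict (Int × Int) Int).keys = [start] := rfl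
  have hmain := corrMain steps cols rows occupied steps.toNat 0 (by omega) [start]
    (PySem.Dict.mk [(start, 0)])
  simp only [List.map_cons, List.map_nil] at hmain
  rw [hmain, h0]
  have hnd : (floodLoop cols rows occupied steps.toNat [start] [start]).Nodup :=
    floodLoop_nodup cols rows occupied steps.toNat [start] [start] (by simp)
  rw [ofList_eq_self_of_nodup hnd]
  rw [show (PySem.Set.ofList [start] : PySem.Set (Int × Int)) = [start] from rfl]
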